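-- pv_equiv track=rewrite | github.com/Ikerlb/kattis | animal/sol.py | dfs
-- ===== SOURCE A (Python) =====
-- def dfs(tokens, bases, mod):
--     s = [0]
--     st = set()
--     for c in tokens:
--         if c == "(":
--             s.append(0)
--         elif c == ",":
--             continue
--         elif c == ")":
--             ret = s.pop()
--             st.add(ret)
--             s[-1] = (s[-1] + ret) % mod
--         else:
--             st.add(bases[c])
--             s[-1] = (s[-1] + bases[c]) % mod
--     return st
-- ===== SOURCE B (Python) =====
-- def dfs(tokens, bases, mod):
--     st = set()
--     pos = 0
--
--     def parse_group():
--         # returns (group_sum, closed): closed is False iff input ran out before ")"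
--         nonlocal pos
--         total = 0
--         while pos < len(tokens):
--             c = tokens[pos]
--             pos += 1
--             if c == ")":
--                 return total, True
--             if c == ",":
--                 continue
--             if c == "(":
--                 g, closed = parse_group()
--                 if not closed:
--                     return total, False
--                 st.add(g)
--                 total = (total + g) % mod
--             else:
--                 v = bases[c]
--                 st.add(v)
--                 total = (total + v) % mod
--         return total, False
--
--     parse_group()
--     return st
-- ===== Notes on version B (the rewrite author's own statement) =====
-- stated objective: alternative
-- what changed: Replaces A's explicit stack of running group sums driven by a flat token loop with a recursive-descent parser whose parse_group threads a token cursor, returns each group's sum when its ')' is consumed, and reports whether the group was actually closed.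
import Mathlib
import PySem

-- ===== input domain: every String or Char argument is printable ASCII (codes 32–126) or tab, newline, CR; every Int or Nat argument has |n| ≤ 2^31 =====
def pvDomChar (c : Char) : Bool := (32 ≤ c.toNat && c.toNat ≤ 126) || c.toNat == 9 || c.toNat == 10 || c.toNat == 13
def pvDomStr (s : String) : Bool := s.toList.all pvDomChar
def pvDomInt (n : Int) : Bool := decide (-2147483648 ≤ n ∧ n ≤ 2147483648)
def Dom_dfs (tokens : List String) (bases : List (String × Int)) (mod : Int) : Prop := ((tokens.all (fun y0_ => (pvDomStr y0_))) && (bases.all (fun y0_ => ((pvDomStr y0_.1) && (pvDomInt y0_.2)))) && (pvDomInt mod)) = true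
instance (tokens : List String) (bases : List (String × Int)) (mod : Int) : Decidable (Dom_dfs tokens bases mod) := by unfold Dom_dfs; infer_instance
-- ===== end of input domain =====

-- B replaces A's explicit stack of running sums by a recursive-descent parser over the
-- token stream (objective: alternative decomposition, same cost); return value only.

-- ===== PORT A =====
-- Python list s is kept TOP-FIRST: s.append = cons, s.pop = head, s[-1] = head.
def dfsStep (bases : List (String × Int)) (mod : Int)
    (acc : List Int × PySem.Set Int) (c : String) : List Int × PySem.Set Int :=
  if c = "(" then (0 :: acc.1, acc.2)
  else if c = "," then acc
  else if c = ")" then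
    match acc.1 with
    | ret :: top :: rest => ((PySem.Int.mod (top + ret) mod) :: rest, PySem.Set.add acc.2 ret)
    | _ => acc              -- Python raises IndexError here; excluded by Pre_dfs
  else
    -- bases[c]: Python raises KeyError when c is missing; excluded by Pre_dfs
    let v := PySem.Dict.getD (PySem.Dict.mk bases) c 0
    match acc.1 with
    | top :: rest => ((PySem.Int.mod (top + v) mod) :: rest, PySem.Set.add acc.2 v)
    | [] => acc             -- unreachable: the stack is never empty

def dfs (tokens : List String) (bases : List (String × Int)) (mod : Int) : List Int :=
  (tokens.foldl (dfsStep bases mod) ([0], PySem.Set.empty)).2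

-- ===== PORT B =====
-- parse_group of Source B: returns (group sum, closed?, remaining tokens, set so far).
-- The fuel argument only makes the recursion structural; with fuel > tokens.length
-- (as dfs_alt passes) it is never exhausted, since every call consumes ≥ 1 token.
def parseGroup (bases : List (String × Int)) (mod : Int) :
    Nat → List String → Int → PySem.Set Int → Int × Bool × List String × PySem.Set Int
  | 0, ts, total, st => (total, false, ts, st)
  | _ + 1, [], total, st => (total, false, [], st)
  | fuel + 1, c :: rest, total, st =>
    if c = ")" then (total, true, rest, st)
    else if c = "," then parseGroup bases mod fuel rest total st
    else if c = "(" then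
      match parseGroup bases mod fuel rest 0 st with
      | (g, closed, rest', st') =>
        if closed then
          parseGroup bases mod fuel rest' (PySem.Int.mod (total + g) mod) (PySem.Set.add st' g)
        else (total, false, rest', st')
    else
      let v := PySem.Dict.getD (PySem.Dict.mk bases) c 0   -- bases[c]; KeyError excluded by Pre_dfs
      parseGroup bases mod fuel rest (PySem.Int.mod (total + v) mod) (PySem.Set.add st v)

def dfs_alt (tokens : List String) (bases : List (String × Int)) (mod : Int) : List Int :=
  (parseGroup bases mod (tokens.length + 1) tokens 0 PySem.Set.empty).2.2.2

-- ===== PRECONDITION & SPEC =====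
-- Scanning ts with d enclosing open groups, no ")" ever arrives with d = 0
-- (on such inputs Python A raises IndexError).
def balancedFrom (d : Nat) : List String → Bool
  | [] => true
  | c :: rest =>
    if c = "(" then balancedFrom (d + 1) rest
    else if c = ")" then decide (0 < d) && balancedFrom (d - 1) rest
    else balancedFrom d rest

-- Pre_dfs excludes exactly the inputs where Python A raises: an unmatched ")"
-- (IndexError), a leaf token missing from bases (KeyError), and mod = 0 when some
-- leaf or ")" makes A compute % mod (ZeroDivisionError).
def Pre_dfs (tokens : List String) (bases : List (String × Int)) (mod : Int) : Prop :=
  balancedFrom 0 tokens = true ∧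
  (∀ c ∈ tokens, c ≠ "(" → c ≠ ")" → c ≠ "," → (PySem.Dict.get? (PySem.Dict.mk bases) c).isSome = true) ∧
  (mod ≠ 0 ∨ ∀ c ∈ tokens, c = "(" ∨ c = ",")
instance (tokens : List String) (bases : List (String × Int)) (mod : Int) : Decidable (Pre_dfs tokens bases mod) := by unfold Pre_dfs; infer_instance

def pvWitness_dfs : List String × (List (String × Int)) × Int :=
  (["(", "a", ",", "(", "b", ")", ")", ",", "a"], [("a", 3), ("b", 7)], 10)

def Spec_dfs (tokens : List String) (bases : List (String × Int)) (mod : Int) (out : List Int) : Prop := out = dfs_alt tokens bases mod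
instance (tokens : List String) (bases : List (String × Int)) (mod : Int) (out : List Int) : Decidable (Spec_dfs tokens bases mod out) := by unfold Spec_dfs; infer_instance

-- ===== CLAIM (what is proved, stated in full; the proofs are below) =====
def Claim_equal_dfs : Prop := ∀ (tokens : List String) (bases : List (String × Int)) (mod : Int), Dom_dfs tokens bases mod → Pre_dfs tokens bases mod → Spec_dfs tokens bases mod (dfs tokens bases mod)

-- ===== LEMMAS AND PROOFS =====

-- Main invariant: with the A-stack total :: rs and balancedFrom rs.length ts,
-- if parseGroup stops by consuming an unmatched ")" (closed = true), the A-fold over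
-- ts equals the A-fold over the remaining tokens after performing that same pop;
-- otherwise parseGroup consumed everything and the two sides produced the same set.
theorem parse_fold (bases : List (String × Int)) (mod : Int) :
    ∀ (fuel : Nat) (ts : List String) (total : Int) (rs : List Int) (st : PySem.Set Int),
      ts.length < fuel → balancedFrom rs.length ts = true →
      (let r := parseGroup bases mod fuel ts total st
       if r.2.1 then
         r.2.2.1.length < ts.length ∧ balancedFrom (rs.length - 1) r.2.2.1 = true ∧
         ∃ rtop rrest, rs = rtop :: rrest ∧
           List.foldl (dfsStep bases mod) (total :: rs, st) ts
             = List.foldl (dfsStep bases mod)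
                 ((PySem.Int.mod (rtop + r.1) mod) :: rrest, PySem.Set.add r.2.2.2 r.1) r.2.2.1
       else
         r.2.2.1 = [] ∧
           (List.foldl (dfsStep bases mod) (total :: rs, st) ts).2 = r.2.2.2) := by
  intro fuel
  induction fuel with
  | zero => intro ts total rs st hlen _; omega
  | succ fuel ih =>
    intro ts total rs st hlen hbal
    match ts with
    | [] => simp [parseGroup]
    | c :: rest =>
      have hlen' : rest.length < fuel := by simpa using hlen
      by_cases hcp : c = ")"
      · subst hcp
        simp [balancedFrom] at hbal
        obtain ⟨hd, hbal'⟩ := hbal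
        obtain ⟨rtop, rrest⟩ : ∃ rtop rrest, rs = rtop :: rrest := by
          cases rs with
          | nil => simp at hd
          | cons a l => exact ⟨a, l, rfl⟩
        obtain ⟨rrest, hrs⟩ := rrest
        subst hrs
        have hstep : parseGroup bases mod (fuel + 1) (")" :: rest) total st
            = (total, true, rest, st) := by simp [parseGroup]
        rw [hstep]
        refine ⟨by simp, by simpa using hbal', rtop, rrest, rfl, ?_⟩
        simp [dfsStep]
      · by_cases hcc : c = ","
        · subst hcc
          have hbal' : balancedFrom rs.length rest = true := by
            simpa [balancedFrom] using hbal
          have hstep : parseGroup bases mod (fuel + 1) ("," :: rest) total st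
              = parseGroup bases mod fuel rest total st := by simp [parseGroup]
          have hfold : List.foldl (dfsStep bases mod) (total :: rs, st) ("," :: rest)
              = List.foldl (dfsStep bases mod) (total :: rs, st) rest := by simp [dfsStep]
          rw [hstep, hfold]
          have h := ih rest total rs st hlen' hbal'
          rcases hres : parseGroup bases mod fuel rest total st with ⟨g, cl, rest', st'⟩
          rw [hres] at h
          cases cl with
          | false => exact h
          | true =>
            simp only [reduceIte] at h ⊢
            obtain ⟨h1, h2, h3⟩ := h
            exact ⟨by simp at h1 ⊢; omega, h2, h3⟩
        · by_cases hco : c = "("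
          · subst hco
            have hbal' : balancedFrom (rs.length + 1) rest = true := by
              simpa [balancedFrom] using hbal
            rcases hr : parseGroup bases mod fuel rest 0 st with ⟨g, closed, rest', st'⟩
            have hinner := ih rest 0 (total :: rs) st hlen' (by simpa using hbal')
            rw [hr] at hinner
            have hfold0 : List.foldl (dfsStep bases mod) (total :: rs, st) ("(" :: rest)
                = List.foldl (dfsStep bases mod) (0 :: total :: rs, st) rest := by
              simp [dfsStep]
            cases closed with
            | false =>
              have hstep : parseGroup bases mod (fuel + 1) ("(" :: rest) total st
                  = (total, false, rest', st') := by simp [parseGroup, hr]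
              rw [hstep]
              simp only [if_neg Bool.false_ne_true] at hinner ⊢
              exact ⟨hinner.1, by rw [hfold0]; exact hinner.2⟩
            | true =>
              have hstep : parseGroup bases mod (fuel + 1) ("(" :: rest) total st
                  = parseGroup bases mod fuel rest'
                      (PySem.Int.mod (total + g) mod) (PySem.Set.add st' g) := by
                simp [parseGroup, hr]
              simp only [reduceIte] at hinner
              obtain ⟨hlt, hbal2, rtop, rrest, heq, hfold⟩ := hinner
              obtain ⟨h1, h2⟩ := List.cons.inj heq
              rw [← h1, ← h2] at hfold
              have houter := ih rest' (PySem.Int.mod (total + g) mod) rs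
                (PySem.Set.add st' g) (by omega) (by simpa using hbal2)
              rcases hro : parseGroup bases mod fuel rest'
                  (PySem.Int.mod (total + g) mod) (PySem.Set.add st' g) with ⟨g2, closed2, rest2, st2⟩
              rw [hro] at houter
              rw [hstep, hro]
              have hfold' : List.foldl (dfsStep bases mod) (total :: rs, st) ("(" :: rest)
                  = List.foldl (dfsStep bases mod)
                      ((PySem.Int.mod (total + g) mod) :: rs, PySem.Set.add st' g) rest' := by
                rw [hfold0]; simpa using hfold
              cases closed2 with
              | false =>
                simp only [if_neg Bool.false_ne_true] at houter ⊢
                exact ⟨houter.1, by rw [hfold']; exact houter.2⟩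
              | true =>
                simp only [reduceIte] at houter ⊢
                obtain ⟨hl2, hb2, rt2, rr2, he2, hf2⟩ := houter
                refine ⟨by simp; omega, by simpa using hb2, rt2, rr2, he2, ?_⟩
                rw [hfold']; exact hf2
          · -- leaf token
            have hbal' : balancedFrom rs.length rest = true := by
              simpa [balancedFrom, hco, hcp, hcc] using hbal
            have hstep : parseGroup bases mod (fuel + 1) (c :: rest) total st
                = parseGroup bases mod fuel rest
                    (PySem.Int.mod (total + PySem.Dict.getD (PySem.Dict.mk bases) c 0) mod)
                    (PySem.Set.add st (PySem.Dict.getD (PySem.Dict.mk bases) c 0)) := by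
              simp [parseGroup, hco, hcp, hcc]
            have hfold : List.foldl (dfsStep bases mod) (total :: rs, st) (c :: rest)
                = List.foldl (dfsStep bases mod)
                    ((PySem.Int.mod (total + PySem.Dict.getD (PySem.Dict.mk bases) c 0) mod) :: rs,
                      PySem.Set.add st (PySem.Dict.getD (PySem.Dict.mk bases) c 0)) rest := by
              simp [dfsStep, hco, hcp, hcc]
            rw [hstep, hfold]
            have h := ih rest (PySem.Int.mod (total + PySem.Dict.getD (PySem.Dict.mk bases) c 0) mod) rs
                (PySem.Set.add st (PySem.Dict.getD (PySem.Dict.mk bases) c 0)) hlen' hbal'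
            rcases hres : parseGroup bases mod fuel rest
                (PySem.Int.mod (total + PySem.Dict.getD (PySem.Dict.mk bases) c 0) mod)
                (PySem.Set.add st (PySem.Dict.getD (PySem.Dict.mk bases) c 0)) with ⟨g, cl, rest', st'⟩
            rw [hres] at h
            cases cl with
            | false => exact h
            | true =>
              simp only [reduceIte] at h ⊢
              obtain ⟨h1, h2, h3⟩ := h
              exact ⟨by simp at h1 ⊢; omega, h2, h3⟩

-- ===== VERDICT (by name: the statement is the Claim_ definition above) =====
theorem dfs_spec : Claim_equal_dfs := by
  intro tokens bases mod _ hpre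
  unfold Spec_dfs dfs dfs_alt
  have h := parse_fold bases mod (tokens.length + 1) tokens 0 [] PySem.Set.empty
    (by omega) (by simpa using hpre.1)
  set r := parseGroup bases mod (tokens.length + 1) tokens 0 PySem.Set.empty with hr
  by_cases hc : r.2.1 = true
  · rw [if_pos hc] at h
    obtain ⟨_, _, rtop, rrest, habs, _⟩ := h
    exact absurd habs (by simp)
  · rw [if_neg hc] at h
    exact h.2
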